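-- pv_equiv track=rewrite | github.com/podhmo/goconvert | goconvert/typeresolver.py | on_finish
-- ===== SOURCE A (Python) =====
-- from collections import namedtuple
--
-- Action = namedtuple("Action", "action, src, dst")
--
-- def on_finish(src_hist, dst_hist):
--     src_hist.extend(reversed(dst_hist))
--     path = src_hist
--     coerce_path = []
--     for i in range(len(path) - 1):
--         if path[i] == path[i + 1]:
--             continue
--         prev, next_ = path[i], path[i + 1]
--         if coerce_path and coerce_path[-1][1] == next_ and coerce_path[-1][2] == prev:
--             coerce_path.pop()
--             continue
--         coerce_path.append(Action(action="coerce", src=prev, dst=next_))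
--     return coerce_path
-- ===== SOURCE B (Python) =====
-- from collections import namedtuple
--
-- Action = namedtuple("Action", "action, src, dst")
--
-- def on_finish(src_hist, dst_hist):
--     src_hist.extend(reversed(dst_hist))
--     path = src_hist
--     # Maintain a stack of path NODES, cancelling immediate backtracks,
--     # then reconstruct the coerce actions from consecutive stack nodes.
--     stack = []
--     for node in path:
--         if stack and stack[-1] == node:
--             continue  # consecutive duplicate
--         if len(stack) >= 2 and stack[-2] == node:
--             stack.pop()  # backtrack cancels the previous move
--             continue
--         stack.append(node)
--     return [Action(action="coerce", src=s, dst=t) for s, t in zip(stack, stack[1:])]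
-- ===== Notes on version B (the rewrite author's own statement) =====
-- stated objective: alternative
-- what changed: B maintains a stack of path nodes (skip consecutive duplicates, pop on immediate backtrack) instead of a list of Action edges, and reconstructs the coerce actions in a second pass from consecutive stack nodes.
import Mathlib
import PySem

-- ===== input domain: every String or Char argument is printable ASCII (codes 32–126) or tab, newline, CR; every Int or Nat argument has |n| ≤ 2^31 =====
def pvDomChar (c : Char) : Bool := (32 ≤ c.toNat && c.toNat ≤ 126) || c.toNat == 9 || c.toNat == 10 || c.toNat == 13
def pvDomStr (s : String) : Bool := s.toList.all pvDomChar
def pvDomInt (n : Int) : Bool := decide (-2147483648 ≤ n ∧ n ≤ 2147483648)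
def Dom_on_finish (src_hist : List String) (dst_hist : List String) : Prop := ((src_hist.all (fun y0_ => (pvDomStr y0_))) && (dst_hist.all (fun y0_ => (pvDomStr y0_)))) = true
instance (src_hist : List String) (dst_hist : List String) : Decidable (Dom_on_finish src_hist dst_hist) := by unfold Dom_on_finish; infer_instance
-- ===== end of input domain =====

-- B keeps a stack of path nodes and rebuilds the edges afterwards; same cost, different decomposition.
-- The Python A mutates src_hist in place (extend); the equivalence proved here is about the RETURN value only.

-- ===== PORT A =====
-- path[i] accesses are always in range (0 ≤ i < len(path) - 1), so pyGetD with a "" default is exact here.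
def on_finish (src_hist : List String) (dst_hist : List String) : List (String × String × String) :=
  let path := src_hist ++ dst_hist.reverse
  (PySem.List.pyRange 0 ((path.length : Int) - 1) 1).foldl
    (fun coerce_path i =>
      if PySem.List.pyGetD path i "" == PySem.List.pyGetD path (i + 1) "" then coerce_path
      else
        let prev := PySem.List.pyGetD path i ""
        let next_ := PySem.List.pyGetD path (i + 1) ""
        match coerce_path.getLast? with
        | some a =>
          if a.2.1 == next_ && a.2.2 == prev then coerce_path.dropLast
          else coerce_path ++ [("coerce", prev, next_)]
        | none => coerce_path ++ [("coerce", prev, next_)]) []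

-- ===== PORT B =====
-- The Python stack (append/pop at the right end, tests on stack[-1]/stack[-2]) is kept head-first
-- here (push = cons, stack[-1] = head, stack[-2] = second) and reversed before the reconstruction pass.
def on_finish_alt (src_hist : List String) (dst_hist : List String) : List (String × String × String) :=
  let path := src_hist ++ dst_hist.reverse
  let stack := path.foldl
    (fun stack node =>
      match stack with
      | [] => [node]
      | t :: rest =>
        if t == node then stack
        else
          match rest with
          | s :: _ => if s == node then rest else node :: stack
          | [] => node :: stack) []
  let st := stack.reverse
  (st.zip st.tail).map (fun p => ("coerce", p.1, p.2))

-- ===== PRECONDITION & SPEC =====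
def Spec_on_finish (src_hist : List String) (dst_hist : List String) (out : List (String × String × String)) : Prop := out = on_finish_alt src_hist dst_hist
instance (src_hist : List String) (dst_hist : List String) (out : List (String × String × String)) : Decidable (Spec_on_finish src_hist dst_hist out) := by unfold Spec_on_finish; infer_instance

-- ===== CLAIM (what is proved, stated in full; the proofs are below) =====
def Claim_equal_on_finish : Prop := ∀ (src_hist : List String) (dst_hist : List String), Dom_on_finish src_hist dst_hist → Spec_on_finish src_hist dst_hist (on_finish src_hist dst_hist)

-- ===== LEMMAS AND PROOFS =====

-- A's per-pair step (the body of A's loop on the two adjacent values).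
def stepA (cp : List (String × String × String)) (prev next_ : String) : List (String × String × String) :=
  if prev == next_ then cp
  else
    match cp.getLast? with
    | some a =>
      if a.2.1 == next_ && a.2.2 == prev then cp.dropLast
      else cp ++ [("coerce", prev, next_)]
    | none => cp ++ [("coerce", prev, next_)]

-- A's loop re-expressed as a recursion over adjacent pairs.
def pairA (prev : String) (rest : List String) (cp : List (String × String × String)) : List (String × String × String) :=
  match rest with
  | [] => cp
  | n :: r => pairA n r (stepA cp prev n)

-- B's stack step.
def stepB (stack : List String) (node : String) : List String :=
  match stack with
  | [] => [node]
  | t :: rest =>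
    if t == node then stack
    else
      match rest with
      | s :: _ => if s == node then rest else node :: stack
      | [] => node :: stack

-- Edges of a node list (B's reconstruction pass).
def edges (l : List String) : List (String × String × String) :=
  (l.zip l.tail).map (fun p => ("coerce", p.1, p.2))

lemma edges_cons_cons (a b : String) (l : List String) :
    edges (a :: b :: l) = ("coerce", a, b) :: edges (b :: l) := rfl

lemma edges_append_singleton (l : List String) (h : l ≠ []) (b : String) :
    edges (l ++ [b]) = edges l ++ [("coerce", l.getLast h, b)] := by
  induction l with
  | nil => exact absurd rfl h
  | cons x t ih =>
    cases t with
    | nil => rfl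
    | cons y t' =>
      have htne : (y :: t' : List String) ≠ [] := by simp
      have := ih htne
      simp only [List.cons_append] at this ⊢
      rw [edges_cons_cons, this, edges_cons_cons, List.getLast_cons htne]
      simp

lemma edges_rev_push (a b : String) (l : List String) :
    edges ((b :: a :: l).reverse) = edges ((a :: l).reverse) ++ [("coerce", a, b)] := by
  have hne : (a :: l).reverse ≠ [] := by simp
  have h1 : (b :: a :: l).reverse = (a :: l).reverse ++ [b] := by simp
  rw [h1, edges_append_singleton _ hne b, List.getLast_reverse]
  simp

lemma rangeFold (rest : List String) (p : String) (cp : List (String × String × String)) :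
    (List.range rest.length).foldl
      (fun cp k => stepA cp ((p :: rest).getD k "") ((p :: rest).getD (k + 1) "")) cp
    = pairA p rest cp := by
  induction rest generalizing p cp with
  | nil => rfl
  | cons n r ih =>
    rw [List.length_cons, List.range_succ_eq_map, List.foldl_cons, List.foldl_map]
    have hfun : (fun (cp : List (String × String × String)) (k : Nat) =>
        stepA cp ((p :: n :: r).getD (k + 1) "") ((p :: n :: r).getD (k + 1 + 1) ""))
        = fun cp k => stepA cp ((n :: r).getD k "") ((n :: r).getD (k + 1) "") := by
      funext cp' k
      simp
    rw [hfun]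
    simpa using ih n (stepA cp p n)

lemma on_finish_eq (src_hist dst_hist : List String) :
    on_finish src_hist dst_hist
    = match src_hist ++ dst_hist.reverse with
      | [] => []
      | p :: rest => pairA p rest [] := by
  show (PySem.List.pyRange 0 (((src_hist ++ dst_hist.reverse).length : Int) - 1) 1).foldl
      (fun cp i => stepA cp (PySem.List.pyGetD (src_hist ++ dst_hist.reverse) i "")
                           (PySem.List.pyGetD (src_hist ++ dst_hist.reverse) (i + 1) "")) []
    = _
  cases h : src_hist ++ dst_hist.reverse with
  | nil => rfl
  | cons p rest =>
    have hlen : (((p :: rest).length : Int) - 1) = (rest.length : Int) := by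
      simp
    rw [hlen, PySem.List.pyRange_one, List.foldl_map]
    have hfun : (fun (cp : List (String × String × String)) (k : Nat) =>
        stepA cp (PySem.List.pyGetD (p :: rest) ((0 : Int) + (k : Int)) "")
                 (PySem.List.pyGetD (p :: rest) ((0 : Int) + (k : Int) + 1) ""))
        = fun cp k => stepA cp ((p :: rest).getD k "") ((p :: rest).getD (k + 1) "") := by
      funext cp' k
      have h1 : ((0 : Int) + (k : Int)) = ((k : Nat) : Int) := by ring
      have h2 : ((k : Int) + 1) = (((k + 1 : Nat)) : Int) := by push_cast; ring
      rw [h1, h2, PySem.List.pyGetD_natCast, PySem.List.pyGetD_natCast]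
    have hcast : ((rest.length : Int) - 0).toNat = rest.length := by simp
    rw [hcast, hfun, rangeFold]

lemma alt_eq (src_hist dst_hist : List String) :
    on_finish_alt src_hist dst_hist
    = match src_hist ++ dst_hist.reverse with
      | [] => []
      | p :: rest => edges ((rest.foldl stepB [p]).reverse) := by
  show edges (((src_hist ++ dst_hist.reverse).foldl stepB []).reverse) = _
  cases h : src_hist ++ dst_hist.reverse with
  | nil => rfl
  | cons p rest => rfl

lemma mainL (rest : List String) (top : String) (stk : List String) :
    pairA top rest (edges ((top :: stk).reverse)) = edges ((rest.foldl stepB (top :: stk)).reverse) := by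
  induction rest generalizing top stk with
  | nil => rfl
  | cons n r ih =>
    rw [List.foldl_cons]
    show pairA n r (stepA (edges ((top :: stk).reverse)) top n) = _
    by_cases htn : top = n
    · subst htn
      have h1 : stepA (edges ((top :: stk).reverse)) top top = edges ((top :: stk).reverse) := by
        simp [stepA]
      have h2 : stepB (top :: stk) top = top :: stk := by simp [stepB]
      rw [h1, h2]; exact ih top stk
    · cases stk with
      | nil =>
        have h1 : stepA (edges ([top].reverse)) top n = edges ((n :: top :: ([] : List String)).reverse) := by
          rw [edges_rev_push top n []]
          simp [stepA, edges, htn]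
        have h2 : stepB [top] n = n :: [top] := by simp [stepB, htn]
        rw [h1, h2]; exact ih n [top]
      | cons s t =>
        have hc : edges ((top :: s :: t).reverse) = edges ((s :: t).reverse) ++ [("coerce", s, top)] :=
          edges_rev_push s top t
        by_cases hsn : s = n
        · subst hsn
          have h1 : stepA (edges ((top :: s :: t).reverse)) top s = edges ((s :: t).reverse) := by
            rw [hc]
            simp [stepA, htn]
          have h2 : stepB (top :: s :: t) s = s :: t := by simp [stepB, htn]
          rw [h1, h2]; exact ih s t
        · have h1 : stepA (edges ((top :: s :: t).reverse)) top n
              = edges ((n :: top :: s :: t).reverse) := by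
            rw [edges_rev_push top n (s :: t), hc]
            simp [stepA, htn, hsn]
          have h2 : stepB (top :: s :: t) n = n :: top :: s :: t := by simp [stepB, htn, hsn]
          rw [h1, h2]; exact ih n (top :: s :: t)

-- ===== VERDICT (by name: the statement is the Claim_ definition above) =====
theorem on_finish_spec : Claim_equal_on_finish := by
  intro src_hist dst_hist _
  unfold Spec_on_finish
  rw [on_finish_eq, alt_eq]
  cases h : src_hist ++ dst_hist.reverse with
  | nil => rfl
  | cons p rest =>
    have := mainL rest p []
    simpa [edges] using this
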